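-- pv_equiv track=rewrite | github.com/DaehyunYoo/Coding_study | 프로그래머스/2단계/할인 행사.py | solution
-- ===== SOURCE A (Python) =====
-- from collections import Counter
--
-- def solution(want, number, discount):
--     answer = 0
--     dic = dict(zip(want, number))
--
--     for i in range(len(discount)-9):
--         sales = Counter(discount[i:i+10])
--         if sales == dic:
--             answer += 1
--
--     return answer
-- ===== SOURCE B (Python) =====
-- def solution(want, number, discount):
--     target = dict(zip(want, number))
--     n = len(discount)
--     # A window Counter always has positive values summing to 10, so any
--     # non-positive desired count makes a match impossible.
--     if n < 10 or any(v <= 0 for v in target.values()):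
--         return 0
--     cnt = {}
--     bad = len(target)  # number of keys k with cnt.get(k, 0) != target.get(k, 0)
--
--     def shift(k, d):
--         nonlocal bad
--         old = cnt.get(k, 0)
--         new = old + d
--         cnt[k] = new
--         t = target.get(k, 0)
--         bad += (new != t) - (old != t)
--
--     for j in range(10):
--         shift(discount[j], 1)
--     answer = 1 if bad == 0 else 0
--     for i in range(1, n - 9):
--         shift(discount[i - 1], -1)
--         shift(discount[i + 9], 1)
--         if bad == 0:
--             answer += 1
--     return answer
-- ===== Notes on version B (the rewrite author's own statement) =====
-- stated objective: faster
-- what changed: B replaces A's per-window Counter rebuild and dict comparison with an O(n) sliding window that updates one outgoing and one incoming count per step and maintains a single mismatch counter (answer += 1 whenever it is zero), with an early 0 return when some desired count is non-positive and thus unmatchable.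
import Mathlib
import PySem

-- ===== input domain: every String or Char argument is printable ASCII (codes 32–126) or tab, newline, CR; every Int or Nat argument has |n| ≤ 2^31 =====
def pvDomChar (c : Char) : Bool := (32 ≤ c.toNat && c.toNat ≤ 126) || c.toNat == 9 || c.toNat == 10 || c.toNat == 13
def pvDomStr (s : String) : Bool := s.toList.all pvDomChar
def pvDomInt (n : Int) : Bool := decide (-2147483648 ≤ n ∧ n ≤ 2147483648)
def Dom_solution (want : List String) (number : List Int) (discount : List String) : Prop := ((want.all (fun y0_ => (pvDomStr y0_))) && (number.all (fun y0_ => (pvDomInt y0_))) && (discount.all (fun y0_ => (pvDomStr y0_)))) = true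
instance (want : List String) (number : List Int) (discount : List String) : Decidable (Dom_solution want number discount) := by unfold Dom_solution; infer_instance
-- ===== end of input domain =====

-- B replaces A's per-window Counter rebuild + dict comparison (O(n·w)) by an O(n)
-- sliding window that maintains counts and one mismatch counter incrementally.

-- ===== PORT A =====
-- Python's `==` between a Counter and a dict compares the two mappings (key set and
-- values); exact here since both sides have unique keys (always true of real dicts).
def pyDictEqInt (a b : PySem.Dict String Int) : Bool :=
  a.size == b.size && a.items.all (fun kv => b.get? kv.1 == some kv.2)

def solution (want : List String) (number : List Int) (discount : List String) : Int :=
  let dic := PySem.Dict.ofList (want.zip number)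
  (PySem.List.pyRange 0 ((discount.length : Int) - 9) 1).foldl
    (fun answer i =>
      let sales := PySem.Dict.counter (PySem.List.slice discount (some i) (some (i + 10)))
      if pyDictEqInt sales dic then answer + 1 else answer) 0

-- ===== PORT B =====
-- Source B's `shift`: update the count of key k by dlt and adjust the mismatch counter.
def shiftB (target : PySem.Dict String Int) (st : PySem.Dict String Int × Int)
    (k : String) (dlt : Int) : PySem.Dict String Int × Int :=
  let old := st.1.getD k 0
  let new := old + dlt
  let cnt := st.1.insert k new
  let t := target.getD k 0
  (cnt, st.2 + ((if new ≠ t then (1 : Int) else 0) - (if old ≠ t then (1 : Int) else 0)))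

def solution_alt (want : List String) (number : List Int) (discount : List String) : Int :=
  let target := PySem.Dict.ofList (want.zip number)
  let n : Int := discount.length
  if n < 10 || target.values.any (fun v => decide (v ≤ 0)) then 0
  else
    let st0 : PySem.Dict String Int × Int := (PySem.Dict.empty, (target.size : Int))
    let st1 := (PySem.List.pyRange 0 10 1).foldl
      (fun st j => shiftB target st (PySem.List.pyGetD discount j "") 1) st0
    let a0 : Int := if st1.2 = 0 then 1 else 0
    let r := (PySem.List.pyRange 1 (n - 9) 1).foldl
      (fun p i =>
        let s1 := shiftB target p.1 (PySem.List.pyGetD discount (i - 1) "") (-1)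
        let s2 := shiftB target s1 (PySem.List.pyGetD discount (i + 9) "") 1
        (s2, if s2.2 = 0 then p.2 + 1 else p.2)) (st1, a0)
    r.2

-- ===== PRECONDITION & SPEC =====
def Spec_solution (want : List String) (number : List Int) (discount : List String) (out : Int) : Prop := out = solution_alt want number discount
instance (want : List String) (number : List Int) (discount : List String) (out : Int) : Decidable (Spec_solution want number discount out) := by unfold Spec_solution; infer_instance

-- ===== CLAIM (what is proved, stated in full; the proofs are below) =====
def Claim_equal_solution : Prop := ∀ (want : List String) (number : List Int) (discount : List String), Dom_solution want number discount → Spec_solution want number discount (solution want number discount)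

-- ===== LEMMAS AND PROOFS =====

-- the number of keys whose current count disagrees with the target mapping
def badSpec (d c : PySem.Dict String Int) : Int :=
  ((PySem.Set.ofList (d.keys ++ c.keys)).countP (fun k => !(c.getD k 0 == d.getD k 0)) : Int)

-- loop invariant of B's sliding state for window w
def SlideInv (d : PySem.Dict String Int) (w : List String) (st : PySem.Dict String Int × Int) : Prop :=
  (∀ k, st.1.getD k 0 = (w.count k : Int)) ∧ st.1.keys.Nodup ∧ st.2 = badSpec d st.1

theorem countP_flip {α : Type} [DecidableEq α] (l : List α) (hl : l.Nodup) (k : α)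
    (hk : k ∈ l) (P P' : α → Bool) (hagree : ∀ x ∈ l, x ≠ k → P' x = P x) :
    l.countP P' + (if P k then 1 else 0) = l.countP P + (if P' k then 1 else 0) := by
  induction l with
  | nil => cases hk
  | cons x t ih =>
    rcases List.mem_cons.mp hk with rfl | hkt
    · have ht : ∀ y ∈ t, P' y = P y := fun y hy =>
        hagree y (List.mem_cons_of_mem _ hy) (fun h => (List.nodup_cons.mp hl).1 (h ▸ hy))
      have : t.countP P' = t.countP P :=
        List.countP_congr (fun y hy => by rw [ht y hy])
      simp only [List.countP_cons, this]
      split_ifs <;> omega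
    · have hxk : x ≠ k := fun h => (List.nodup_cons.mp hl).1 (h ▸ hkt)
      have hx : P' x = P x := hagree x (List.mem_cons_self) hxk
      have := ih (List.nodup_cons.mp hl).2 hkt
        (fun y hy hyk => hagree y (List.mem_cons_of_mem _ hy) hyk)
      simp only [List.countP_cons, hx]
      omega

theorem mem_keys_iff_get?_ne (d : PySem.Dict String Int) (k : String) :
    k ∈ d.keys ↔ d.get? k ≠ none := by
  constructor
  · intro h hnone
    exact (PySem.Dict.get?_eq_none_iff_not_mem_keys d k).mp hnone h
  · intro h
    by_contra hk
    exact h ((PySem.Dict.get?_eq_none_iff_not_mem_keys d k).mpr hk)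

theorem keys_length_eq_size (d : PySem.Dict String Int) : d.keys.length = d.size := by
  simp [PySem.Dict.keys, PySem.Dict.size]

theorem dictEq_iff (a b : PySem.Dict String Int) (ha : a.keys.Nodup) (hb : b.keys.Nodup) :
    pyDictEqInt a b = true ↔ ∀ k, a.get? k = b.get? k := by
  unfold pyDictEqInt
  simp only [Bool.and_eq_true, beq_iff_eq, List.all_eq_true]
  constructor
  · rintro ⟨hsize, hall⟩ k
    cases hga : a.get? k with
    | some v =>
      have hmem := PySem.Dict.mem_items_of_get?_eq_some a hga
      have := hall (k, v) hmem
      simpa using this.symm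
    | none =>
      cases hgb : b.get? k with
      | none => rfl
      | some w =>
        exfalso
        have hsub : a.keys ⊆ b.keys := by
          intro x hx
          have hx' := (mem_keys_iff_get?_ne a x).mp hx
          cases hgax : a.get? x with
          | none => exact absurd hgax hx'
          | some vx =>
            have := hall (x, vx) (PySem.Dict.mem_items_of_get?_eq_some a hgax)
            apply (mem_keys_iff_get?_ne b x).mpr
            simp at this
            simp [this]
        have hlen : b.keys.length ≤ a.keys.length := by
          rw [keys_length_eq_size, keys_length_eq_size, hsize]
        have hperm : a.keys.Perm b.keys :=
          (List.subperm_of_subset ha hsub).perm_of_length_le hlen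
        have hkb : k ∈ b.keys := (mem_keys_iff_get?_ne b k).mpr (by simp [hgb])
        have hka : k ∈ a.keys := hperm.mem_iff.mpr hkb
        exact (mem_keys_iff_get?_ne a k).mp hka hga
  · intro h
    constructor
    · have hmem : ∀ x, x ∈ a.keys ↔ x ∈ b.keys := by
        intro x
        rw [mem_keys_iff_get?_ne, mem_keys_iff_get?_ne, h x]
      have hperm : a.keys.Perm b.keys := (List.perm_ext_iff_of_nodup ha hb).mpr hmem
      rw [← keys_length_eq_size, ← keys_length_eq_size]
      exact hperm.length_eq
    · rintro ⟨k, v⟩ hmem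
      have hk : a.get? k = some v := PySem.Dict.get?_of_mem_items a hmem ha
      simpa using h k ▸ hk

theorem counter_get? (xs : List String) (k : String) :
    (PySem.Dict.counter xs).get? k =
      if 0 < xs.count k then some ((xs.count k : Int)) else none := by
  by_cases hmem : k ∈ xs
  · have hk : k ∈ (PySem.Dict.counter xs).keys := by
      rw [PySem.Dict.keys_counter]
      exact (PySem.Set.mem_ofList xs k).mpr hmem
    have hne := (mem_keys_iff_get?_ne _ k).mp hk
    cases hg : (PySem.Dict.counter xs).get? k with
    | none => exact absurd hg hne
    | some v =>
      have hgd : (PySem.Dict.counter xs).getD k 0 = v := by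
        rw [PySem.Dict.getD_eq_get?_getD, hg]; rfl
      rw [PySem.Dict.getD_counter] at hgd
      rw [if_pos (List.count_pos_iff.mpr hmem), ← hgd]
  · have hk : k ∉ (PySem.Dict.counter xs).keys := by
      rw [PySem.Dict.keys_counter]
      intro h
      exact hmem ((PySem.Set.mem_ofList xs k).mp h)
    rw [(PySem.Dict.get?_eq_none_iff_not_mem_keys _ k).mpr hk,
        if_neg (by simp [List.count_eq_zero_of_not_mem hmem])]

-- value of any present key, via getD
theorem getD_mem_values (d : PySem.Dict String Int) (hd : d.keys.Nodup) (k : String)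
    (hk : k ∈ d.keys) : d.getD k 0 ∈ d.values := by
  have hex : ∃ v, (k, v) ∈ d.items := by
    simp only [PySem.Dict.keys, List.mem_map] at hk
    obtain ⟨⟨k', v⟩, hmem, hk'⟩ := hk
    exact ⟨v, hk' ▸ hmem⟩
  obtain ⟨v, hv⟩ := hex
  rw [PySem.Dict.getD_of_mem_items d hv hd]
  simp only [PySem.Dict.values, List.mem_map]
  exact ⟨(k, v), hv, rfl⟩

-- the window Counter equals the dict iff every count agrees with getD (all values positive)
theorem match_iff (d : PySem.Dict String Int) (hd : d.keys.Nodup)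
    (hpos : ∀ v ∈ d.values, 0 < v) (w : List String) :
    pyDictEqInt (PySem.Dict.counter w) d = true ↔ ∀ k, ((w.count k : Int)) = d.getD k 0 := by
  rw [dictEq_iff _ _ (PySem.Dict.nodup_keys_counter _) hd]
  constructor
  · intro h k
    have hk := h k
    rw [counter_get?] at hk
    cases hg : d.get? k with
    | some v =>
      rw [hg] at hk
      split_ifs at hk with _hc
      rw [PySem.Dict.getD_eq_get?_getD, hg]
      simpa using hk
    | none =>
      rw [hg] at hk
      rw [PySem.Dict.getD_eq_get?_getD, hg]
      simp only [Option.getD_none]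
      split_ifs at hk with _hc
      omega
  · intro h k
    rw [counter_get?]
    cases hg : d.get? k with
    | some v =>
      have hv : 0 < v := hpos v (by
        have hgv : d.getD k 0 = v := by rw [PySem.Dict.getD_eq_get?_getD, hg]; rfl
        exact hgv ▸ getD_mem_values d hd k ((mem_keys_iff_get?_ne d k).mpr (by simp [hg])))
      have hk := h k
      rw [PySem.Dict.getD_eq_get?_getD, hg] at hk
      simp only [Option.getD_some] at hk
      rw [if_pos (by omega), hk]
    | none =>
      have hk := h k
      rw [PySem.Dict.getD_eq_get?_getD, hg] at hk
      simp only [Option.getD_none] at hk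
      rw [if_neg (by omega)]

theorem badSpec_insert (d c : PySem.Dict String Int) (_hc : c.keys.Nodup) (x : String) (v : Int) :
    badSpec d (c.insert x v) = badSpec d c +
      ((if v ≠ d.getD x 0 then (1 : Int) else 0) - (if c.getD x 0 ≠ d.getD x 0 then (1 : Int) else 0)) := by
  unfold badSpec
  have hnodupL : (PySem.Set.ofList (d.keys ++ c.keys)).Nodup := PySem.Set.nodup_ofList _
  have hagree : ∀ y ∈ PySem.Set.ofList (d.keys ++ c.keys), y ≠ x →
      (!(((c.insert x v).getD y 0) == d.getD y 0)) = (!((c.getD y 0) == d.getD y 0)) := by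
    intro y _ hyx
    rw [PySem.Dict.getD_insert_of_ne c _ _ hyx]
  by_cases hxL : x ∈ d.keys ++ c.keys
  · have hxL' : x ∈ PySem.Set.ofList (d.keys ++ c.keys) := (PySem.Set.mem_ofList _ x).mpr hxL
    have hkeys : PySem.Set.ofList (d.keys ++ (c.insert x v).keys)
        = PySem.Set.ofList (d.keys ++ c.keys) := by
      cases hcon : c.contains x with
      | true => rw [PySem.Dict.keys_insert_of_contains c v hcon]
      | false =>
        rw [PySem.Dict.keys_insert_of_not_contains c v hcon, ← List.append_assoc,
          PySem.Set.ofList_append_singleton, PySem.Set.add_of_mem hxL']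
    rw [hkeys]
    have hflip := countP_flip (PySem.Set.ofList (d.keys ++ c.keys)) hnodupL x hxL'
      (fun k => !((c.getD k 0) == d.getD k 0))
      (fun k => !(((c.insert x v).getD k 0) == d.getD k 0)) hagree
    simp only [PySem.Dict.getD_insert_self] at hflip
    by_cases h1 : v = d.getD x 0 <;> by_cases h2 : c.getD x 0 = d.getD x 0 <;>
      simp [h1, h2] at hflip ⊢ <;> omega
  · have hcon : c.contains x = false := by
      cases hcon : c.contains x with
      | false => rfl
      | true =>
        exact absurd (List.mem_append.mpr
          (Or.inr ((PySem.Dict.contains_iff_mem_keys c x).mp hcon))) hxL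
    have hxd : x ∉ d.keys := fun h => hxL (List.mem_append.mpr (Or.inl h))
    have hcd : c.getD x 0 = 0 := PySem.Dict.getD_of_not_contains c 0 hcon
    have hdd : d.getD x 0 = 0 := by
      apply PySem.Dict.getD_of_not_contains d 0
      cases hcond : d.contains x with
      | false => rfl
      | true => exact absurd ((PySem.Dict.contains_iff_mem_keys d x).mp hcond) hxd
    have hkeys : PySem.Set.ofList (d.keys ++ (c.insert x v).keys)
        = PySem.Set.ofList (d.keys ++ c.keys) ++ [x] := by
      rw [PySem.Dict.keys_insert_of_not_contains c v hcon, ← List.append_assoc,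
        PySem.Set.ofList_append_singleton,
        PySem.Set.add_of_not_mem (fun h => hxL ((PySem.Set.mem_ofList _ x).mp h))]
    rw [hkeys, List.countP_append]
    have hcong : (PySem.Set.ofList (d.keys ++ c.keys)).countP
        (fun k => !(((c.insert x v).getD k 0) == d.getD k 0))
        = (PySem.Set.ofList (d.keys ++ c.keys)).countP
        (fun k => !((c.getD k 0) == d.getD k 0)) := by
      apply List.countP_congr
      intro y hy
      rw [hagree y hy (fun h => hxL ((PySem.Set.mem_ofList _ x).mp (h ▸ hy)))]
    rw [hcong]
    simp only [List.countP_cons, List.countP_nil, PySem.Dict.getD_insert_self, hcd, hdd]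
    by_cases h1 : v = 0 <;> simp [h1]

theorem shift_in (d : PySem.Dict String Int) (w : List String)
    (st : PySem.Dict String Int × Int) (x : String) (h : SlideInv d w st) :
    SlideInv d (w ++ [x]) (shiftB d st x 1) := by
  obtain ⟨hcnt, hnd, hbad⟩ := h
  refine ⟨?_, PySem.Dict.nodup_keys_insert _ _ _ hnd, ?_⟩
  · intro k
    simp only [shiftB]
    rw [PySem.Dict.getD_insert]
    by_cases hk : k = x
    · subst hk
      rw [if_pos rfl, hcnt k]
      have : (w ++ [k]).count k = w.count k + 1 := by
        simp [List.count_append]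
      rw [this]
      push_cast
      ring
    · rw [if_neg hk, hcnt k]
      have : (w ++ [x]).count k = w.count k := by
        simp [List.count_append, Ne.symm hk]
      rw [this]
  · simp only [shiftB]
    rw [badSpec_insert d st.1 hnd x _, hbad]

theorem shift_out (d : PySem.Dict String Int) (w : List String)
    (st : PySem.Dict String Int × Int) (x : String) (h : SlideInv d (x :: w) st) :
    SlideInv d w (shiftB d st x (-1)) := by
  obtain ⟨hcnt, hnd, hbad⟩ := h
  refine ⟨?_, PySem.Dict.nodup_keys_insert _ _ _ hnd, ?_⟩
  · intro k
    simp only [shiftB]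
    rw [PySem.Dict.getD_insert]
    by_cases hk : k = x
    · subst hk
      rw [if_pos rfl, hcnt k]
      have : (k :: w).count k = w.count k + 1 := by simp
      rw [this]
      push_cast
      ring
    · rw [if_neg hk, hcnt k]
      have : (x :: w).count k = w.count k := by
        rw [List.count_cons]
        simp [Ne.symm hk]
      rw [this]
  · simp only [shiftB]
    rw [badSpec_insert d st.1 hnd x _, hbad]

theorem fold_in (d : PySem.Dict String Int) (l w : List String)
    (st : PySem.Dict String Int × Int) (h : SlideInv d w st) :
    SlideInv d (w ++ l) (l.foldl (fun st x => shiftB d st x 1) st) := by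
  induction l generalizing w st with
  | nil => simpa using h
  | cons x t ih =>
    have := ih (w ++ [x]) (shiftB d st x 1) (shift_in d w st x h)
    simpa using this

theorem init_inv (d : PySem.Dict String Int) (hd : d.keys.Nodup)
    (hpos : ∀ v ∈ d.values, 0 < v) :
    SlideInv d [] (PySem.Dict.empty, (d.size : Int)) := by
  refine ⟨fun k => by simp [PySem.Dict.getD_empty], PySem.Dict.nodup_keys_empty, ?_⟩
  unfold badSpec
  simp only [PySem.Dict.keys_empty, List.append_nil]
  rw [PySem.Set.ofList_eq_self_of_nodup _ hd]
  have hall : d.keys.countP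
      (fun k => !((PySem.Dict.empty.getD k 0 : Int) == d.getD k 0)) = d.keys.length := by
    rw [List.countP_eq_length]
    intro k hk
    have hv : 0 < d.getD k 0 := hpos _ (getD_mem_values d hd k hk)
    simp [PySem.Dict.getD_empty]
    omega
  rw [hall, keys_length_eq_size]

theorem bad_zero_iff (d : PySem.Dict String Int) (w : List String)
    (st : PySem.Dict String Int × Int) (h : SlideInv d w st) :
    (st.2 = 0 ↔ ∀ k, ((w.count k : Int)) = d.getD k 0) := by
  obtain ⟨hcnt, hnd, hbad⟩ := h
  rw [hbad]
  unfold badSpec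
  rw [Int.natCast_eq_zero, List.countP_eq_zero]
  constructor
  · intro h k
    by_cases hk : k ∈ PySem.Set.ofList (d.keys ++ st.1.keys)
    · have := h k hk
      rw [← hcnt k]
      simpa using this
    · have hk' : k ∉ d.keys ++ st.1.keys := fun h' => hk ((PySem.Set.mem_ofList _ k).mpr h')
      have hkd : k ∉ d.keys := fun h' => hk' (List.mem_append.mpr (Or.inl h'))
      have hkc : k ∉ st.1.keys := fun h' => hk' (List.mem_append.mpr (Or.inr h'))
      have h1 : d.getD k 0 = 0 := by
        apply PySem.Dict.getD_of_not_contains d 0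
        cases hcond : d.contains k with
        | false => rfl
        | true => exact absurd ((PySem.Dict.contains_iff_mem_keys d k).mp hcond) hkd
      have h2 : st.1.getD k 0 = 0 := by
        apply PySem.Dict.getD_of_not_contains st.1 0
        cases hcond : st.1.contains k with
        | false => rfl
        | true => exact absurd ((PySem.Dict.contains_iff_mem_keys st.1 k).mp hcond) hkc
      rw [h1, ← hcnt k, h2]
  · intro h k _
    have hh := h k
    rw [← hcnt k] at hh
    simp [hh]

-- range-indexed fold over a prefix is a fold over take
theorem fold_pyRange_take {σ : Type} (xs : List String) (m : Nat) (hm : m ≤ xs.length)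
    (f : σ → String → σ) (init : σ) :
    (PySem.List.pyRange 0 (m : Int) 1).foldl
      (fun st j => f st (PySem.List.pyGetD xs j "")) init = (xs.take m).foldl f init := by
  induction m generalizing init with
  | zero => simp [PySem.List.pyRange_one_eq_nil]
  | succ n ih =>
    have hn : n < xs.length := by omega
    have hsplit : PySem.List.pyRange 0 ((n + 1 : Nat) : Int) 1
        = PySem.List.pyRange 0 (n : Int) 1 ++ [(n : Int)] := by
      have h := PySem.List.pyRange_one_succ_right (a := 0) (b := (n : Int)) (by positivity)
      push_cast
      push_cast at h
      exact h
    rw [hsplit, List.foldl_append, ih (by omega)]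
    have hget : PySem.List.pyGetD xs ((n : Int)) "" = xs[n] := by
      rw [PySem.List.pyGetD_eq_getElem xs "" (by positivity) (by exact_mod_cast hn)]
      simp
    have htake : xs.take (n + 1) = xs.take n ++ [xs[n]] := by
      rw [List.take_add_one]
      simp [List.getElem?_eq_getElem hn]
    rw [htake, List.foldl_append]
    simp [hget]


-- one full step of both loops, then downstream equality, by induction on remaining fuel
theorem loop_eq (d : PySem.Dict String Int) (xs : List String) (hd : d.keys.Nodup)
    (hpos : ∀ v ∈ d.values, 0 < v) :
    ∀ (fuel : Nat), ∀ (j : Nat) (st : PySem.Dict String Int × Int) (acc : Int),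
      ((xs.length : Int) - 9 - ((j : Int) + 1)).toNat ≤ fuel →
      j + 10 ≤ xs.length →
      SlideInv d ((xs.drop j).take 10) st →
      (PySem.List.pyRange ((j : Int) + 1) ((xs.length : Int) - 9) 1).foldl
        (fun answer i =>
          if pyDictEqInt (PySem.Dict.counter (PySem.List.slice xs (some i) (some (i + 10)))) d = true
          then answer + 1 else answer) acc
      = ((PySem.List.pyRange ((j : Int) + 1) ((xs.length : Int) - 9) 1).foldl
          (fun p i =>
            (shiftB d (shiftB d p.1 (PySem.List.pyGetD xs (i - 1) "") (-1))
                (PySem.List.pyGetD xs (i + 9) "") 1,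
             if (shiftB d (shiftB d p.1 (PySem.List.pyGetD xs (i - 1) "") (-1))
                (PySem.List.pyGetD xs (i + 9) "") 1).2 = 0 then p.2 + 1 else p.2))
          (st, acc)).2 := by
  intro fuel
  induction fuel with
  | zero =>
    intro j st acc hfuel hlen _hinv
    have hle : (xs.length : Int) - 9 ≤ (j : Int) + 1 := by omega
    rw [PySem.List.pyRange_one_eq_nil hle]
    rfl
  | succ n ih =>
    intro j st acc hfuel hlen hinv
    by_cases hend : (xs.length : Int) - 9 ≤ (j : Int) + 1
    · rw [PySem.List.pyRange_one_eq_nil hend]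
      rfl
    · have hlt : (j : Int) + 1 < (xs.length : Int) - 9 := lt_of_not_ge hend
      have hj : j < xs.length := by omega
      have hj10 : j + 10 < xs.length := by omega
      rw [PySem.List.pyRange_one_cons hlt]
      simp only [List.foldl_cons]
      have hget1 : PySem.List.pyGetD xs (((j : Int) + 1) - 1) "" = xs[j] := by
        have he : ((j : Int) + 1) - 1 = ((j : Nat) : Int) := by ring
        rw [he, PySem.List.pyGetD_eq_getElem xs "" (by positivity) (by exact_mod_cast hj)]
        simp
      have hget2 : PySem.List.pyGetD xs (((j : Int) + 1) + 9) "" = xs[j + 10] := by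
        have he : ((j : Int) + 1) + 9 = ((j + 10 : Nat) : Int) := by push_cast; ring
        rw [he, PySem.List.pyGetD_eq_getElem xs "" (by positivity) (by exact_mod_cast hj10)]
        have hto : (((j + 10 : Nat) : Int)).toNat = j + 10 := by omega
        simp only [hto]
      have hwin_cons : (xs.drop j).take 10 = xs[j] :: ((xs.drop (j + 1)).take 9) := by
        rw [List.drop_eq_getElem_cons hj]
        rfl
      have hlend : 9 < (xs.drop (j + 1)).length := by
        simp
        omega
      have hwin_snoc : (xs.drop (j + 1)).take 10 = (xs.drop (j + 1)).take 9 ++ [xs[j + 10]] := by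
        have hdg : (xs.drop (j + 1))[9]'hlend = xs[j + 10] := by
          rw [List.getElem_drop]
        have h1 : (xs.drop (j + 1)).take (9 + 1)
            = (xs.drop (j + 1)).take 9 ++ [(xs.drop (j + 1))[9]'hlend] := by
          rw [List.take_add_one, List.getElem?_eq_getElem hlend]
          simp
        rw [hdg] at h1
        exact h1
      have hinv1 : SlideInv d ((xs.drop (j + 1)).take 9) (shiftB d st xs[j] (-1)) :=
        shift_out d _ st xs[j] (hwin_cons ▸ hinv)
      have hinv2 : SlideInv d ((xs.drop (j + 1)).take 10)
          (shiftB d (shiftB d st xs[j] (-1)) xs[j + 10] 1) := by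
        rw [hwin_snoc]
        exact shift_in d _ _ xs[j + 10] hinv1
      have hslice : PySem.List.slice xs (some ((j : Int) + 1)) (some (((j : Int) + 1) + 10))
          = (xs.drop (j + 1)).take 10 := by
        have h1 : ((j : Int) + 1) = ((j + 1 : Nat) : Int) := by push_cast; ring
        rw [h1]
        rw [show ((j + 1 : Nat) : Int) + 10 = ((j + 1 : Nat) : Int) + ((10 : Nat) : Int) from by
          norm_num]
        rw [PySem.List.slice_natCast_add]
      have hcond : (pyDictEqInt (PySem.Dict.counter
            (PySem.List.slice xs (some ((j : Int) + 1)) (some (((j : Int) + 1) + 10)))) d = true)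
          ↔ ((shiftB d (shiftB d st xs[j] (-1)) xs[j + 10] 1).2 = 0) := by
        rw [hslice, match_iff d hd hpos, bad_zero_iff d _ _ hinv2]
      have haccs : (if pyDictEqInt (PySem.Dict.counter
            (PySem.List.slice xs (some ((j : Int) + 1)) (some (((j : Int) + 1) + 10)))) d = true
            then acc + 1 else acc)
          = (if (shiftB d (shiftB d st xs[j] (-1)) xs[j + 10] 1).2 = 0 then acc + 1 else acc) := by
        by_cases hcl : pyDictEqInt (PySem.Dict.counter
            (PySem.List.slice xs (some ((j : Int) + 1)) (some (((j : Int) + 1) + 10)))) d = true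
        · rw [if_pos hcl, if_pos (hcond.mp hcl)]
        · rw [if_neg hcl, if_neg (fun h => hcl (hcond.mpr h))]
      rw [hget1, hget2, haccs]
      have hcast : ((j : Int) + 1) + 1 = (((j + 1 : Nat) : Int)) + 1 := by push_cast; ring
      rw [hcast]
      exact ih (j + 1) _ _ (by push_cast; omega) (by omega) hinv2


-- ===== VERDICT (by name: the statement is the Claim_ definition above) =====
theorem solution_spec : Claim_equal_solution := by
  intro want number discount _hdom
  unfold Spec_solution
  simp only [solution, solution_alt]
  set d := PySem.Dict.ofList (want.zip number) with hd_def
  have hd : d.keys.Nodup := PySem.Dict.nodup_keys_ofList _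
  by_cases hguard : ((discount.length : Int) < 10
      || d.values.any (fun v => decide (v ≤ 0))) = true
  · rw [if_pos hguard]
    rcases Bool.or_eq_true_iff.mp hguard with hlen | hval
    · have hle : (discount.length : Int) - 9 ≤ 0 := by
        have := of_decide_eq_true hlen
        omega
      rw [PySem.List.pyRange_one_eq_nil hle]
      rfl
    · obtain ⟨v, hvmem, hv0⟩ : ∃ v ∈ d.values, v ≤ 0 := by
        obtain ⟨v, h1, h2⟩ := List.any_eq_true.mp hval
        exact ⟨v, h1, of_decide_eq_true h2⟩
      obtain ⟨⟨k, v'⟩, hmemi, hv'⟩ : ∃ p ∈ d.items, p.2 = v := by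
        simpa [PySem.Dict.values, List.mem_map] using hvmem
      have hget : d.get? k = some v := by
        rw [← hv']
        exact PySem.Dict.get?_of_mem_items d hmemi hd
      have hfalse : ∀ (acc : Int), ∀ i ∈ PySem.List.pyRange 0 ((discount.length : Int) - 9) 1,
          (if pyDictEqInt (PySem.Dict.counter
              (PySem.List.slice discount (some i) (some (i + 10)))) d = true
           then acc + 1 else acc) = acc := by
        intro acc i _
        rw [if_neg]
        intro h
        have hk := (dictEq_iff _ _ (PySem.Dict.nodup_keys_counter _) hd).mp h k
        rw [counter_get?, hget] at hk
        split_ifs at hk with hc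
        · have : ((PySem.List.slice discount (some i) (some (i + 10))).count k : Int) = v := by
            simpa using hk
          omega
      rw [PySem.List.foldl_congr_mem _ _ (fun acc _ => acc) 0 hfalse,
        PySem.List.foldl_ignore]
  · rw [if_neg hguard]
    have hor := Bool.or_eq_false_iff.mp (Bool.not_eq_true _ |>.mp hguard)
    have h10 : 10 ≤ discount.length := by
      have := of_decide_eq_false hor.1
      omega
    have hpos : ∀ v ∈ d.values, 0 < v := by
      intro v hv
      have := List.any_eq_false.mp hor.2 v hv
      simpa using this
    -- B's first loop builds the state of window 0
    have hst1 : (PySem.List.pyRange 0 10 1).foldl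
        (fun st j => shiftB d st (PySem.List.pyGetD discount j "") 1)
        (PySem.Dict.empty, (d.size : Int))
        = (discount.take 10).foldl (fun st x => shiftB d st x 1)
          (PySem.Dict.empty, (d.size : Int)) := by
      have := fold_pyRange_take discount 10 h10 (fun st x => shiftB d st x 1)
        (PySem.Dict.empty, (d.size : Int))
      norm_num at this
      exact this
    have hinv1 : SlideInv d (discount.take 10)
        ((discount.take 10).foldl (fun st x => shiftB d st x 1)
          (PySem.Dict.empty, (d.size : Int))) := by
      have := fold_in d (discount.take 10) [] _ (init_inv d hd hpos)
      simpa using this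
    rw [hst1]
    set st1 := (discount.take 10).foldl (fun st x => shiftB d st x 1)
      (PySem.Dict.empty, (d.size : Int)) with hst1_def
    -- peel the first window off A's loop
    have h0lt : (0 : Int) < (discount.length : Int) - 9 := by omega
    rw [PySem.List.pyRange_one_cons h0lt]
    simp only [List.foldl_cons]
    have hslice0 : PySem.List.slice discount (some 0) (some (0 + 10)) = discount.take 10 := by
      rw [PySem.List.slice_zero_start]
      rw [show ((0 : Int) + 10) = (10 : Int) from by norm_num]
      rw [PySem.List.slice_to discount (by norm_num)]
      rfl
    have hcond0 : (pyDictEqInt (PySem.Dict.counter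
          (PySem.List.slice discount (some 0) (some (0 + 10)))) d = true) ↔ st1.2 = 0 := by
      rw [hslice0, match_iff d hd hpos, bad_zero_iff d _ _ hinv1]
    have hacc0 : (if pyDictEqInt (PySem.Dict.counter
          (PySem.List.slice discount (some 0) (some (0 + 10)))) d = true
          then (0 : Int) + 1 else 0) = (if st1.2 = 0 then (1 : Int) else 0) := by
      by_cases hcl : pyDictEqInt (PySem.Dict.counter
          (PySem.List.slice discount (some 0) (some (0 + 10)))) d = true
      · rw [if_pos hcl, if_pos (hcond0.mp hcl)]
        norm_num
      · rw [if_neg hcl, if_neg (fun h => hcl (hcond0.mpr h))]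
    rw [hacc0]
    have hinv0 : SlideInv d ((discount.drop 0).take 10) st1 := by
      simpa using hinv1
    have hmain := loop_eq d discount hd hpos
      ((discount.length : Int) - 9 - 1).toNat 0 st1 (if st1.2 = 0 then (1 : Int) else 0)
      (by norm_num) (by omega) hinv0
    norm_num at hmain
    exact hmain
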